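-- pv_equiv track=rewrite | github.com/JAndretti/Benchmark_CVRP_heuristics_metaheuristics_solver | func/utils.py | convert_routes_to_multiple_routes
-- ===== SOURCE A (Python) =====
-- def convert_routes_to_multiple_routes(route):
--     """Convert a single route to multiple routes."""
--     routes = []
--     current_route = []
--     for node in route:
--         current_route.append(node)
--         if node == 0 and len(current_route) > 1:
--             if current_route != [0, 0]:
--                 routes.append(current_route)
--             current_route = []
--             current_route.append(0)
--     return routes
-- ===== SOURCE B (Python) =====
-- def convert_routes_to_multiple_routes(route):
--     """Convert a single route to multiple routes."""
--     zeros = [i for i, node in enumerate(route) if node == 0]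
--     routes = []
--     prev = 0
--     first = True
--     for t in zeros:
--         if t > prev:
--             sub = route[0:t + 1] if first else [0] + route[prev + 1:t + 1]
--             if sub != [0, 0]:
--                 routes.append(sub)
--             first = False
--             prev = t
--     return routes
-- ===== Notes on version B (the rewrite author's own statement) =====
-- stated objective: alternative
-- what changed: B first collects all depot (zero) positions in one enumerate pass and then builds each subroute by slicing the route between consecutive depot indices, instead of A's element-by-element running accumulator.
import Mathlib
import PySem

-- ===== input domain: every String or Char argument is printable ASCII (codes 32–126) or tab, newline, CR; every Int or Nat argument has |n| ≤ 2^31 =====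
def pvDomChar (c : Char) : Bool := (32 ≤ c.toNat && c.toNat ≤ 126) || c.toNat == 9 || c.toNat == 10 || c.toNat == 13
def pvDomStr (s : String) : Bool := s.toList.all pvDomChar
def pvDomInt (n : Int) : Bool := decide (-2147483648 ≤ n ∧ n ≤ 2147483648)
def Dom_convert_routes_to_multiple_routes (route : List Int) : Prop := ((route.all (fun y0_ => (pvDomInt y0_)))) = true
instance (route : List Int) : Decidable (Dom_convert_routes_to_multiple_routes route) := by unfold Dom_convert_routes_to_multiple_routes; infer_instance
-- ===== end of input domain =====

-- B replaces A's running-accumulator scan by an index table of depot positions plus slicing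
-- (alternative decomposition, same O(n) cost); return values proved equal on all inputs.


-- ===== PORT A =====
def convert_routes_to_multiple_routes (route : List Int) : List (List Int) :=
  (route.foldl (fun (st : List (List Int) × List Int) node =>
      let cur := st.2 ++ [node]
      if node = 0 ∧ cur.length > 1 then
        ((if cur ≠ [0, 0] then st.1 ++ [cur] else st.1), [0])
      else (st.1, cur))
    ([], [])).1

-- ===== PORT B =====
def convert_routes_to_multiple_routes_alt (route : List Int) : List (List Int) :=
  let zeros := ((PySem.List.enumerate route 0).filter (fun p => p.2 = 0)).map (·.1)
  (zeros.foldl (fun (st : List (List Int) × Int × Bool) t =>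
      if t > st.2.1 then
        let sub := if st.2.2 then PySem.List.slice route (some 0) (some (t + 1))
                   else 0 :: PySem.List.slice route (some (st.2.1 + 1)) (some (t + 1))
        ((if sub ≠ [0, 0] then st.1 ++ [sub] else st.1), t, false)
      else st)
    ([], 0, true)).1

-- ===== PRECONDITION & SPEC =====
def Spec_convert_routes_to_multiple_routes (route : List Int) (out : List (List Int)) : Prop := out = convert_routes_to_multiple_routes_alt route
instance (route : List Int) (out : List (List Int)) : Decidable (Spec_convert_routes_to_multiple_routes route out) := by unfold Spec_convert_routes_to_multiple_routes; infer_instance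

-- ===== CLAIM (what is proved, stated in full; the proofs are below) =====
def Claim_equal_convert_routes_to_multiple_routes : Prop := ∀ (route : List Int), Dom_convert_routes_to_multiple_routes route → Spec_convert_routes_to_multiple_routes route (convert_routes_to_multiple_routes route)

-- ===== LEMMAS AND PROOFS =====

-- Common recursive specification: segments of the route split at depot zeros.
def pvSpec (cur : List Int) : List Int → List (List Int)
  | [] => []
  | x :: xs =>
    if x = 0 ∧ (cur ++ [x]).length > 1 then
      (if cur ++ [x] ≠ [0, 0] then [cur ++ [x]] else []) ++ pvSpec [0] xs
    else pvSpec (cur ++ [x]) xs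

-- The step functions of the two ports, named for the lemmas (definitionally equal to the inline lambdas).
def pvFA (st : List (List Int) × List Int) (node : Int) : List (List Int) × List Int :=
  let cur := st.2 ++ [node]
  if node = 0 ∧ cur.length > 1 then
    ((if cur ≠ [0, 0] then st.1 ++ [cur] else st.1), [0])
  else (st.1, cur)

def pvFB (route : List Int) (st : List (List Int) × Int × Bool) (t : Int) :
    List (List Int) × Int × Bool :=
  if t > st.2.1 then
    let sub := if st.2.2 then PySem.List.slice route (some 0) (some (t + 1))
               else 0 :: PySem.List.slice route (some (st.2.1 + 1)) (some (t + 1))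
    ((if sub ≠ [0, 0] then st.1 ++ [sub] else st.1), t, false)
  else st

-- Positions (from the front, as Nats) of the zeros of a list.
def natZeros : List Int → List Nat
  | [] => []
  | x :: xs => if x = 0 then 0 :: (natZeros xs).map (· + 1) else (natZeros xs).map (· + 1)

theorem zeros_eq (l : List Int) (s : Nat) :
    ((PySem.List.enumerate l (s : Int)).filter (fun p => p.2 = 0)).map (·.1)
      = (natZeros l).map (fun k => ((s + k : Nat) : Int)) := by
  induction l generalizing s with
  | nil => simp [natZeros, PySem.List.enumerate_nil]
  | cons x xs ih =>
    have h1 : ((s : Nat) : Int) + 1 = ((s + 1 : Nat) : Int) := by push_cast; ring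
    have hm : ∀ (zs : List Nat), (zs.map (· + 1)).map (fun k => ((s + k : Nat) : Int))
        = zs.map (fun k => ((s + 1 + k : Nat) : Int)) := by
      intro zs
      rw [List.map_map]
      refine List.map_congr_left fun k _ => ?_
      show ((s + (k + 1) : Nat) : Int) = ((s + 1 + k : Nat) : Int)
      congr 1
      omega
    rw [PySem.List.enumerate_cons, List.filter_cons, h1]
    rcases eq_or_ne x 0 with hx | hx
    · rw [if_pos (by simp [hx]), List.map_cons, ih (s + 1)]
      simp only [natZeros, hx]
      simp
      intro a _
      ring
    · rw [if_neg (by simp [hx]), ih (s + 1)]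
      simp only [natZeros, if_neg hx, hm]

theorem lemA (l : List Int) (acc : List (List Int)) (cur : List Int) :
    (l.foldl pvFA (acc, cur)).1 = acc ++ pvSpec cur l := by
  induction l generalizing acc cur with
  | nil => simp [pvSpec]
  | cons x xs ih =>
    simp only [List.foldl_cons, pvSpec, pvFA]
    split_ifs <;> simp_all

theorem lemLF (l : List Int) (route : List Int) (p : Nat) (mid : List Int)
    (acc : List (List Int)) (h : route.drop (p + 1) = mid ++ l) :
    (((natZeros l).map (fun k => ((p + 1 + mid.length + k : Nat) : Int))).foldl
        (pvFB route) (acc, ((p : Nat) : Int), false)).1 = acc ++ pvSpec (0 :: mid) l := by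
  induction l generalizing p mid acc with
  | nil => simp [pvSpec, natZeros]
  | cons x xs ih =>
    have hmap : ∀ (zs : List Nat) (a b : Nat), (∀ k, a + (k + 1) = b + k) →
        ((zs.map (· + 1)).map (fun k => ((a + k : Nat) : Int)))
          = zs.map (fun k => ((b + k : Nat) : Int)) := by
      intro zs a b hab
      rw [List.map_map]
      refine List.map_congr_left fun k _ => ?_
      show ((a + (k + 1) : Nat) : Int) = ((b + k : Nat) : Int)
      rw [hab k]
    rcases eq_or_ne x 0 with hx | hx
    · subst hx
      have hslice : PySem.List.slice route (some (((p : Nat) : Int) + 1))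
          (some (((p + 1 + mid.length + 0 : Nat) : Int) + 1)) = mid ++ [0] := by
        have e1 : ((p : Nat) : Int) + 1 = ((p + 1 : Nat) : Int) := by push_cast; ring
        have e2 : (((p + 1 + mid.length + 0 : Nat) : Int) + 1)
            = ((p + 1 + mid.length + 1 : Nat) : Int) := by push_cast; ring
        rw [e1, e2, PySem.List.slice_natCast, h]
        rw [show p + 1 + mid.length + 1 - (p + 1) = mid.length + 1 from by omega]
        rw [List.take_append]
        simp
      rw [show natZeros (0 :: xs) = 0 :: (natZeros xs).map (· + 1) from by simp [natZeros]]
      simp only [List.map_cons, List.foldl_cons]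
      have hstep : pvFB route (acc, ((p : Nat) : Int), false) ((p + 1 + mid.length + 0 : Nat) : Int)
          = ((if (0 :: (mid ++ [0])) ≠ [0, 0] then acc ++ [0 :: (mid ++ [0])] else acc),
             ((p + 1 + mid.length + 0 : Nat) : Int), false) := by
        unfold pvFB
        rw [if_pos (by push_cast; omega)]
        simp only [Bool.false_eq_true, if_false, hslice]
      rw [hstep]
      have hrest : route.drop (p + 1 + mid.length + 1) = ([] : List Int) ++ xs := by
        have h2 := congrArg (List.drop (mid.length + 1)) h
        rw [List.drop_drop] at h2
        rw [List.nil_append, show p + 1 + mid.length + 1 = p + 1 + (mid.length + 1) from by omega,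
          h2]
        simp
      have ih2 := ih (p + 1 + mid.length) []
        (if (0 :: (mid ++ [0])) ≠ [0, 0] then acc ++ [0 :: (mid ++ [0])] else acc) hrest
      simp only [List.length_nil, Nat.add_zero] at ih2
      rw [show ((p + 1 + mid.length + 0 : Nat) : Int) = ((p + 1 + mid.length : Nat) : Int) from by
        norm_num]
      rw [hmap (natZeros xs) (p + 1 + mid.length) (p + 1 + mid.length + 1) (by omega)]
      rw [ih2]
      by_cases hd : mid = []
      · subst hd
        simp [pvSpec]
      · have hne : (0 :: (mid ++ [0])) ≠ [0, 0] := by simp [hd]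
        simp [pvSpec, hne, List.append_assoc]
    · rw [show natZeros (x :: xs) = (natZeros xs).map (· + 1) from by simp [natZeros, hx]]
      rw [hmap (natZeros xs) (p + 1 + mid.length) (p + 1 + (mid ++ [x]).length)
        (by simp; omega)]
      rw [ih p (mid ++ [x]) acc (by rw [h]; simp)]
      simp [pvSpec, hx]

theorem lemLT (l : List Int) (route : List Int) (m : Nat) (acc : List (List Int))
    (h : route.drop m = l) :
    (((natZeros l).map (fun k => ((m + k : Nat) : Int))).foldl
        (pvFB route) (acc, (0 : Int), true)).1 = acc ++ pvSpec (route.take m) l := by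
  induction l generalizing m acc with
  | nil => simp [pvSpec, natZeros]
  | cons x xs ih =>
    have hmap : ∀ (zs : List Nat) (a b : Nat), (∀ k, a + (k + 1) = b + k) →
        ((zs.map (· + 1)).map (fun k => ((a + k : Nat) : Int)))
          = zs.map (fun k => ((b + k : Nat) : Int)) := by
      intro zs a b hab
      rw [List.map_map]
      refine List.map_congr_left fun k _ => ?_
      show ((a + (k + 1) : Nat) : Int) = ((b + k : Nat) : Int)
      rw [hab k]
    have hdrop : route.drop (m + 1) = xs := by
      rw [← List.tail_drop, h]
      rfl
    have hlt : m < route.length := by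
      have h0 : route.drop m ≠ [] := by rw [h]; simp
      by_contra hc
      exact h0 (List.drop_eq_nil_of_le (by omega))
    have htake : route.take (m + 1) = route.take m ++ [x] := by
      rw [List.take_succ]
      have hget : route[m]? = some x := by
        have h0 : (route.drop m)[0]? = some x := by rw [h]; rfl
        rwa [List.getElem?_drop, Nat.add_zero] at h0
      rw [hget]
      rfl
    rcases eq_or_ne x 0 with hx | hx
    · subst hx
      rw [show natZeros (0 :: xs) = 0 :: (natZeros xs).map (· + 1) from by simp [natZeros]]
      simp only [List.map_cons, List.foldl_cons]
      rcases Nat.eq_zero_or_pos m with hm | hm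
      · subst hm
        have hskip : pvFB route (acc, (0 : Int), true) ((0 + 0 : Nat) : Int)
            = (acc, (0 : Int), true) := by
          unfold pvFB
          rw [if_neg (by norm_num)]
        rw [hskip, hmap (natZeros xs) 0 1 (by omega), ih 1 acc hdrop]
        simp [pvSpec, htake]
      · have hsl : PySem.List.slice route (some 0) (some (((m + 0 : Nat) : Int) + 1))
            = route.take (m + 1) := by
          rw [show (((m + 0 : Nat) : Int) + 1) = ((m + 1 : Nat) : Int) from by push_cast; ring]
          rw [PySem.List.slice_zero_start, PySem.List.slice_to_natCast]
        have hstep : pvFB route (acc, (0 : Int), true) ((m + 0 : Nat) : Int)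
            = ((if route.take (m + 1) ≠ [0, 0] then acc ++ [route.take (m + 1)] else acc),
               ((m + 0 : Nat) : Int), false) := by
          unfold pvFB
          rw [if_pos (show ((m + 0 : Nat) : Int) > (0 : Int) from by push_cast; omega)]
          simp only [if_true, hsl]
        rw [hstep]
        have hLF := lemLF xs route m []
          (if route.take (m + 1) ≠ [0, 0] then acc ++ [route.take (m + 1)] else acc)
          (by simpa using hdrop)
        simp only [List.length_nil, Nat.add_zero] at hLF
        rw [show ((m + 0 : Nat) : Int) = ((m : Nat) : Int) from by norm_num]
        rw [hmap (natZeros xs) m (m + 1) (by omega), hLF]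
        have hlen : (route.take m).length = m := by
          rw [List.length_take]
          omega
        have hcond : (0 : Int) = 0 ∧ (route.take m ++ [(0 : Int)]).length > 1 := by
          refine ⟨rfl, ?_⟩
          simp [hlen]
          omega
        simp only [pvSpec, ← htake]
        by_cases hd : route.take (m + 1) = [0, 0]
        · simp [hd]
        · simp [hd, List.append_assoc]
          exact fun hcontra => absurd (hcontra hm) (by omega)
    · rw [show natZeros (x :: xs) = (natZeros xs).map (· + 1) from by simp [natZeros, hx]]
      rw [hmap (natZeros xs) m (m + 1) (by omega), ih (m + 1) acc hdrop, htake]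
      simp [pvSpec, hx]

-- ===== VERDICT (by name: the statement is the Claim_ definition above) =====
theorem convert_routes_to_multiple_routes_spec : Claim_equal_convert_routes_to_multiple_routes := by
  intro route _
  show convert_routes_to_multiple_routes route = convert_routes_to_multiple_routes_alt route
  have e1 : convert_routes_to_multiple_routes route = (route.foldl pvFA ([], [])).1 := rfl
  have e2 : convert_routes_to_multiple_routes_alt route =
      ((((PySem.List.enumerate route 0).filter (fun p => p.2 = 0)).map (·.1)).foldl
        (pvFB route) ([], (0 : Int), true)).1 := rfl
  have hz := zeros_eq route 0
  have hB := lemLT route route 0 [] (by simp)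
  simp only [Nat.cast_zero, Nat.zero_add, List.take_zero] at hz hB
  rw [e1, e2, lemA route [] [], hz, hB]
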